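-- pv_equiv track=rewrite | github.com/SIJNAME/magicclip | backend/core/intelligence/segmentation.py | _sentence_chunks
-- ===== SOURCE A (Python) =====
-- from typing import Iterable
--
-- def _sentence_chunks(words: Iterable[dict]) -> list[list[dict]]:
--     chunks: list[list[dict]] = []
--     current: list[dict] = []
--     for word in words:
--         if word.get("type") != "word":
--             continue
--         current.append(word)
--         token = str(word.get("word", ""))
--         if any(p in token for p in (".", "?", "!")):
--             chunks.append(current)
--             current = []
--     if current:
--         chunks.append(current)
--     return chunks
-- ===== SOURCE B (Python) =====
-- def _sentence_chunks(words):
--     ws = [w for w in words if w.get("type") == "word"]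
--
--     def ends(w):
--         token = str(w.get("word", ""))
--         return any(p in token for p in (".", "?", "!"))
--
--     def split(ws):
--         i = next((k for k, w in enumerate(ws) if ends(w)), None)
--         if i is None:
--             return [ws] if ws else []
--         return [ws[:i + 1]] + split(ws[i + 1:])
--
--     return split(ws)
-- ===== Notes on version B (the rewrite author's own statement) =====
-- stated objective: alternative
-- what changed: Replaces A's single pass with a mutable current-buffer and end-flush by a filter of the kept words followed by a recursive split that cuts after each sentence-ending word.
import Mathlib
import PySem

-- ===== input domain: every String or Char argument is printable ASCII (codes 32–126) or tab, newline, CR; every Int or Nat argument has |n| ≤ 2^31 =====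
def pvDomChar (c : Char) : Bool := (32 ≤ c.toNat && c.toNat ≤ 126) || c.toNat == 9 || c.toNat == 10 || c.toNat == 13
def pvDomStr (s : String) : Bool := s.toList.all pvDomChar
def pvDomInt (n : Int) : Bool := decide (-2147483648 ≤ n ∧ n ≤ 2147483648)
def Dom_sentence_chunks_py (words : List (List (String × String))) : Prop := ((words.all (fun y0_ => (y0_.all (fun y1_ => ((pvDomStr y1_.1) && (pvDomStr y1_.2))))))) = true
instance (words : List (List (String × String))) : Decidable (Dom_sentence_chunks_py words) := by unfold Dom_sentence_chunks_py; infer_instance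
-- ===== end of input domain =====

-- B filters the kept words once and then recursively splits after each sentence-ending
-- word, instead of A's single pass with a mutable flush buffer (objective: alternative).

-- ===== PORT A =====
-- one fold step of A's loop: skip non-"word" entries, append, flush on a sentence ender
def pvAStep (st : List (List (List (String × String))) × List (List (String × String)))
    (word : List (String × String)) :
    List (List (List (String × String))) × List (List (String × String)) :=
  if (PySem.Dict.mk word).get? "type" ≠ some "word" then st
  else
    let current := st.2 ++ [word]
    let token := ((PySem.Dict.mk word).get? "word").getD ""
    if [".", "?", "!"].any (fun p => PySem.Str.isIn p token) then
      (st.1 ++ [current], [])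
    else
      (st.1, current)

def sentence_chunks_py (words : List (List (String × String))) : List (List (List (String × String))) :=
  let st := words.foldl pvAStep ([], [])
  if st.2 ≠ [] then st.1 ++ [st.2] else st.1

-- ===== PORT B =====
-- Source B's ends(w): the token contains '.', '?' or '!'
def pvBEnds (w : List (String × String)) : Bool :=
  let token := ((PySem.Dict.mk w).get? "word").getD ""
  [".", "?", "!"].any (fun p => PySem.Str.isIn p token)

-- a port lemma cited by bSplit's decreasing_by
theorem pvFindIdx?_lt {α : Type} (p : α → Bool) (xs : List α) (i : Nat)
    (h : xs.findIdx? p = some i) : i < xs.length :=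
  (List.findIdx?_eq_some_iff_findIdx_eq.mp h).1

-- Source B's split(ws): cut after the first sentence ender, recurse on the rest
def pvBSplit (ws : List (List (String × String))) : List (List (List (String × String))) :=
  match h : ws.findIdx? pvBEnds with
  | some i => ws.take (i + 1) :: pvBSplit (ws.drop (i + 1))
  | none => if ws.isEmpty then [] else [ws]
termination_by ws.length
decreasing_by
  have := pvFindIdx?_lt pvBEnds ws i h
  simp; omega

def sentence_chunks_py_alt (words : List (List (String × String))) : List (List (List (String × String))) :=
  pvBSplit (words.filter (fun w => (PySem.Dict.mk w).get? "type" == some "word"))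

-- ===== PRECONDITION & SPEC =====
def Spec_sentence_chunks_py (words : List (List (String × String))) (out : List (List (List (String × String)))) : Prop := out = sentence_chunks_py_alt words
instance (words : List (List (String × String))) (out : List (List (List (String × String)))) : Decidable (Spec_sentence_chunks_py words out) := by unfold Spec_sentence_chunks_py; infer_instance

-- ===== CLAIM (what is proved, stated in full; the proofs are below) =====
def Claim_equal_sentence_chunks_py : Prop := ∀ (words : List (List (String × String))), Dom_sentence_chunks_py words → Spec_sentence_chunks_py words (sentence_chunks_py words)

-- ===== LEMMAS AND PROOFS =====

-- A's loop step restricted to kept ("word") entries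
def pvWStep (st : List (List (List (String × String))) × List (List (String × String)))
    (word : List (String × String)) :
    List (List (List (String × String))) × List (List (String × String)) :=
  if pvBEnds word then (st.1 ++ [st.2 ++ [word]], []) else (st.1, st.2 ++ [word])

theorem pvAStep_eq_wStep (st : List (List (List (String × String))) × List (List (String × String)))
    (w : List (String × String)) (hc : (PySem.Dict.mk w).get? "type" = some "word") :
    pvAStep st w = pvWStep st w := by
  simp only [pvAStep, pvWStep, pvBEnds]
  rw [if_neg (by simp [hc])]
  rfl

-- A's fold over all words = the restricted fold over the filtered words
theorem pv_foldl_filter (ws : List (List (String × String)))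
    (st : List (List (List (String × String))) × List (List (String × String))) :
    ws.foldl pvAStep st =
      (ws.filter (fun w => (PySem.Dict.mk w).get? "type" == some "word")).foldl pvWStep st := by
  induction ws generalizing st with
  | nil => rfl
  | cons w t ih =>
    by_cases hc : (PySem.Dict.mk w).get? "type" = some "word"
    · simp only [List.foldl_cons, List.filter_cons, hc]
      rw [pvAStep_eq_wStep st w hc, ih]
      simp
    · simp only [List.foldl_cons, List.filter_cons]
      simp only [pvAStep]
      rw [if_pos hc, if_neg (by simpa using hc)]
      exact ih st

-- B's split with a pending open chunk (describes A's loop state)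
def pvPre (cur : List (List (String × String))) :
    List (List (String × String)) → List (List (List (String × String)))
  | [] => if cur.isEmpty then [] else [cur]
  | w :: t => if pvBEnds w then (cur ++ [w]) :: pvPre [] t else pvPre (cur ++ [w]) t

-- A's final flush of the restricted fold computes pvPre
theorem pv_fold_eq_pre (ws : List (List (String × String)))
    (chunks : List (List (List (String × String)))) (cur : List (List (String × String))) :
    (let st := ws.foldl pvWStep (chunks, cur)
     if st.2 ≠ [] then st.1 ++ [st.2] else st.1) = chunks ++ pvPre cur ws := by
  induction ws generalizing chunks cur with
  | nil =>
    by_cases h : cur = [] <;> simp [pvPre, h]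
  | cons w t ih =>
    by_cases he : pvBEnds w
    · simp only [List.foldl_cons, pvWStep, he, if_pos]
      rw [ih]
      simp [pvPre, he]
    · simp only [List.foldl_cons, pvWStep, he]
      rw [ih]
      simp [pvPre, he]

-- unfolding equations for pvBSplit
theorem pvBSplit_some (ws : List (List (String × String))) (i : Nat)
    (h : ws.findIdx? pvBEnds = some i) :
    pvBSplit ws = ws.take (i + 1) :: pvBSplit (ws.drop (i + 1)) := by
  rw [pvBSplit]; split <;> simp_all

theorem pvBSplit_none (ws : List (List (String × String)))
    (h : ws.findIdx? pvBEnds = none) :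
    pvBSplit ws = if ws.isEmpty then [] else [ws] := by
  rw [pvBSplit]; split <;> simp_all

-- pvPre with pending chunk cur = pvBSplit with cur prepended to the first chunk
theorem pv_pre_eq_split (ws : List (List (String × String))) (cur : List (List (String × String))) :
    pvPre cur ws =
      if cur.isEmpty then pvBSplit ws
      else match pvBSplit ws with
        | [] => [cur]
        | c :: cs => (cur ++ c) :: cs := by
  induction ws generalizing cur with
  | nil =>
    rw [pvBSplit_none [] (by simp)]
    by_cases h : cur.isEmpty <;> simp [pvPre, h]
  | cons w t ih =>
    by_cases he : pvBEnds w
    · have hf : (w :: t).findIdx? pvBEnds = some 0 := by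
        rw [List.findIdx?_cons]; simp [he]
      rw [pvBSplit_some _ 0 hf]
      simp only [pvPre, he, if_pos]
      rw [ih []]
      by_cases h : cur.isEmpty <;> simp_all
    · have hf : (w :: t).findIdx? pvBEnds = (t.findIdx? pvBEnds).map (· + 1) := by
        rw [List.findIdx?_cons]; simp [he]
      simp only [pvPre, he, if_neg, Bool.false_eq_true, not_false_iff]
      rw [ih (cur ++ [w])]
      cases hj : t.findIdx? pvBEnds with
      | some j =>
        rw [pvBSplit_some t j hj, pvBSplit_some (w :: t) (j + 1) (by rw [hf, hj]; rfl)]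
        by_cases h : cur.isEmpty <;> simp_all
      | none =>
        rw [pvBSplit_none t hj, pvBSplit_none (w :: t) (by rw [hf, hj]; rfl)]
        by_cases ht : t.isEmpty <;> by_cases h : cur.isEmpty <;> simp_all

-- ===== VERDICT (by name: the statement is the Claim_ definition above) =====
theorem sentence_chunks_py_spec : Claim_equal_sentence_chunks_py := by
  intro words _
  show sentence_chunks_py words = sentence_chunks_py_alt words
  unfold sentence_chunks_py sentence_chunks_py_alt
  rw [pv_foldl_filter, pv_fold_eq_pre, pv_pre_eq_split]
  simp
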